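-- pv_equiv track=rewrite | github.com/MrHamdulay/csc3-capstone | examples/data/Assignment_8/lyljon002/question2.py | count
-- ===== SOURCE A (Python) =====
-- def count(k, text):                         #function to count pairs
--     if len(text) == 1 or text == '':        #return no pairs if 1 or no characters
--         return k
--     char1 = text[0]
--     char2 = text[1]
--     if char1 == char2:                  #compare two characters next to each other
--         k = k + 1                       #increase count if they match
--         return count(k, text[2:])       #run function on text missing the pair
--     else:
--         return count(k, text[1:])       #if no pair then run function missing first letter
-- ===== SOURCE B (Python) =====
-- def count(k, text):
--     # single pass with a pending-character state: a pair is counted when the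
--     # current character matches the pending one, which is then consumed
--     prev = None
--     for c in text:
--         if prev is not None and c == prev:
--             k += 1
--             prev = None
--         else:
--             prev = c
--     return k
-- ===== Notes on version B (the rewrite author's own statement) =====
-- stated objective: faster
-- what changed: Replaced the O(n^2) recursion that rebuilds a string slice at every step with a single left-to-right pass keeping only a pending-character state (k, prev).
import Mathlib
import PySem

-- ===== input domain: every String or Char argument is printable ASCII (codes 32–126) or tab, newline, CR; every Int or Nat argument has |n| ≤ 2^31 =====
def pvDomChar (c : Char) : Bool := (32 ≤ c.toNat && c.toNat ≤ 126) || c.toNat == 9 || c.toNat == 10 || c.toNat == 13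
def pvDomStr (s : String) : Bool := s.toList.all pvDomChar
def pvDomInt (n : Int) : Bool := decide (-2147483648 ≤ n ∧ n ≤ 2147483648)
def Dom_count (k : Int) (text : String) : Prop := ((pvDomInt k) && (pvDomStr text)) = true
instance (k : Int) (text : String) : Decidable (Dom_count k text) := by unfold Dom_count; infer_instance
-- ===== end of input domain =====

-- B replaces A's O(n^2) suffix-slicing recursion by a single linear pass with a
-- pending-character state (objective: faster, asymptotic).
-- ===== PORT A =====
-- A's recursion on the string: empty/one-char base cases, then compare the first
-- two characters; on a match add 1 and drop both (text[2:]), else drop one (text[1:]).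
def countGo (k : Int) (l : List Char) : Int :=
  match l with
  | [] => k
  | [_] => k
  | c1 :: c2 :: rest => if c1 = c2 then countGo (k + 1) rest else countGo k (c2 :: rest)

def count (k : Int) (text : String) : Int := countGo k text.toList

-- ===== PORT B =====
-- B's loop body: state is (k, prev); on `prev is not None and c == prev` count and clear.
def stepAlt (s : Int × Option Char) (c : Char) : Int × Option Char :=
  match s.2 with
  | some p => if c = p then (s.1 + 1, none) else (s.1, some c)
  | none => (s.1, some c)

def count_alt (k : Int) (text : String) : Int :=
  (text.toList.foldl stepAlt (k, none)).1

-- ===== PRECONDITION & SPEC =====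
def Spec_count (k : Int) (text : String) (out : Int) : Prop := out = count_alt k text
instance (k : Int) (text : String) (out : Int) : Decidable (Spec_count k text out) := by unfold Spec_count; infer_instance

-- ===== CLAIM (what is proved, stated in full; the proofs are below) =====
def Claim_equal_count : Prop := ∀ (k : Int) (text : String), Dom_count k text → Spec_count k text (count k text)

-- ===== LEMMAS AND PROOFS =====
lemma countGo_eq_foldl (l : List Char) (k : Int) :
    countGo k l = (l.foldl stepAlt (k, none)).1 := by
  fun_induction countGo k l
  case case1 => simp
  case case2 => simp [stepAlt]
  case case3 =>
    rename_i ih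
    simpa [List.foldl, stepAlt] using ih
  case case4 =>
    rename_i h ih
    simpa [List.foldl, stepAlt, Ne.symm h] using ih

-- ===== VERDICT (by name: the statement is the Claim_ definition above) =====
theorem count_spec : Claim_equal_count := by
  intro k text _
  unfold Spec_count count count_alt
  exact countGo_eq_foldl _ _
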